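-- pv_equiv track=rewrite | github.com/zehanort/RFdiffusion2 | rf_diffusion/benchmark/util/pyrosetta_metrics.py | get_topology
-- ===== SOURCE A (Python) =====
-- def get_topology(ss):
--     topology = ''
--     prev = None
--     for x in ss:
--         if (x != prev) and (x != 'L'):
--             topology += x
--         prev = x
--     return topology
-- ===== SOURCE B (Python) =====
-- def get_topology(ss):
--     if not ss:
--         return ''
--
--     def collapse(i, j):
--         # run-head string of ss[i:j] (j > i), by divide and conquer
--         if j - i <= 1:
--             return ss[i:j]
--         m = i + (j - i) // 2
--         left = collapse(i, m)
--         right = collapse(m, j)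
--         if ss[m - 1] == ss[m]:
--             right = right[1:]
--         return left + right
--
--     heads = collapse(0, len(ss))
--     return ''.join(c for c in heads if c != 'L')
-- ===== Notes on version B (the rewrite author's own statement) =====
-- stated objective: alternative
-- what changed: Replaces A's prev-tracking single pass with a divide-and-conquer run collapse: each half's run-head string is computed recursively and merged by dropping the right half's first head when the boundary characters are equal, then the loop entries are filtered out.
import Mathlib
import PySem

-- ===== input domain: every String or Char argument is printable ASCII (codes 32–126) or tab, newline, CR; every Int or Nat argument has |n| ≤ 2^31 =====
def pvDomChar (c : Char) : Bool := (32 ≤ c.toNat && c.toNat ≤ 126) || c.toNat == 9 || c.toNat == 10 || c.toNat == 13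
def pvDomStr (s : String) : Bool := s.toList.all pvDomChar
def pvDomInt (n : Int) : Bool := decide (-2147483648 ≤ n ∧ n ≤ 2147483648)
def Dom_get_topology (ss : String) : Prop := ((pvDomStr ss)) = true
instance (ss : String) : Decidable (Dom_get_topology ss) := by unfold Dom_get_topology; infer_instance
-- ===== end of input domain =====

-- B replaces A's prev-tracking single pass with a divide-and-conquer run-collapse
-- (merge drops the right half's first head when boundary chars match), then filters 'L'
-- (alternative decomposition; no speed claim).

-- ===== PORT A =====
-- literal port of A: one fold over the characters carrying (topology, prev)
def get_topology (ss : String) : String :=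
  (ss.toList.foldl
    (fun (st : List Char × Option Char) x =>
      (if some x ≠ st.2 ∧ x ≠ 'L' then st.1 ++ [x] else st.1, some x))
    ([], none)).1 |> String.mk

-- ===== PORT B =====
-- collapse(i,j) of Source B, transcribed on the sublist: run heads by divide and conquer
-- (the fuel argument only bounds the recursion depth; fuel = length always suffices)
def pvCollapse (fuel : Nat) (l : List Char) : List Char :=
  match fuel with
  | 0 => l
  | fuel + 1 =>
    if l.length ≤ 1 then l
    else
      let m := l.length / 2
      pvCollapse fuel (l.take m) ++
        (if l[m-1]? = l[m]? then (pvCollapse fuel (l.drop m)).tail else pvCollapse fuel (l.drop m))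

def get_topology_alt (ss : String) : String :=
  if ss.toList = [] then ""
  else String.mk ((pvCollapse ss.toList.length ss.toList).filter (fun k => k ≠ 'L'))

-- ===== PRECONDITION & SPEC =====
def Spec_get_topology (ss : String) (out : String) : Prop := out = get_topology_alt ss
instance (ss : String) (out : String) : Decidable (Spec_get_topology ss out) := by unfold Spec_get_topology; infer_instance

-- ===== CLAIM =====
def Claim_equal_get_topology : Prop := ∀ (ss : String), Dom_get_topology ss → Spec_get_topology ss (get_topology ss)

-- ===== LEMMAS AND PROOFS =====

-- A's kept characters as a recursive function of the remaining input and prev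
def pvF : Option Char → List Char → List Char
  | _, [] => []
  | p, x :: xs => (if some x ≠ p ∧ x ≠ 'L' then [x] else []) ++ pvF (some x) xs

lemma pvFoldl_eq_pvF (l : List Char) : ∀ (acc : List Char) (p : Option Char),
    (l.foldl
      (fun (st : List Char × Option Char) x =>
        (if some x ≠ st.2 ∧ x ≠ 'L' then st.1 ++ [x] else st.1, some x))
      (acc, p)).1 = acc ++ pvF p l := by
  induction l with
  | nil => intro acc p; simp [pvF]
  | cons x xs ih =>
    intro acc p
    simp only [List.foldl_cons, pvF]
    by_cases h : some x ≠ p ∧ x ≠ 'L' <;> simp [h, ih]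

-- sequential run-head function, the bridge between the two ports
def pvRuns : List Char → List Char
  | [] => []
  | [x] => [x]
  | x :: y :: xs => if x = y then pvRuns (y :: xs) else x :: pvRuns (y :: xs)

lemma pvRuns_head : ∀ (xs : List Char) (x : Char), pvRuns (x :: xs) = x :: (pvRuns (x :: xs)).tail := by
  intro xs
  induction xs with
  | nil => intro x; simp [pvRuns]
  | cons y ys ih =>
    intro x
    by_cases h : x = y
    · subst h; simpa [pvRuns] using ih x
    · simp [pvRuns, h]

lemma pvF_some : ∀ (l : List Char) (c : Char),
    pvF (some c) l = ((pvRuns (c :: l)).tail).filter (fun k => k ≠ 'L') := by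
  intro l
  induction l with
  | nil => intro c; simp [pvF, pvRuns]
  | cons x xs ih =>
    intro c
    by_cases hc : c = x
    · subst hc
      have hdup : pvRuns (c :: c :: xs) = pvRuns (c :: xs) := by simp [pvRuns]
      simp only [pvF, hdup]
      simpa using ih c
    · have h1 : pvRuns (c :: x :: xs) = c :: pvRuns (x :: xs) := by
        simp [pvRuns, hc]
      rw [pvF, h1, List.tail_cons, pvRuns_head xs x]
      by_cases hL : x = 'L'
      · simpa [hL] using ih x
      · simp [hL, ih x, Ne.symm hc]

lemma pvF_none (l : List Char) : pvF none l = (pvRuns l).filter (fun k => k ≠ 'L') := by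
  cases l with
  | nil => simp [pvF, pvRuns]
  | cons x xs =>
    rw [pvF, pvF_some, pvRuns_head xs x]
    by_cases hL : x = 'L' <;> simp [hL]

-- merge law for pvRuns on an append
lemma pvRuns_cons_cons (x y : Char) (xs : List Char) :
    pvRuns (x :: y :: xs) = if x = y then pvRuns (y :: xs) else x :: pvRuns (y :: xs) := by
  rw [pvRuns]

lemma pvRuns_append : ∀ (a b : List Char), a ≠ [] → b ≠ [] →
    pvRuns (a ++ b) = pvRuns a ++ (if a.getLast? = b.head? then (pvRuns b).tail else pvRuns b) := by
  intro a
  induction a with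
  | nil => intro b h; exact absurd rfl h
  | cons x xs ih =>
    intro b _ hb
    cases xs with
    | nil =>
      cases b with
      | nil => exact absurd rfl hb
      | cons h t =>
        simp only [List.singleton_append]
        rw [pvRuns_cons_cons]
        by_cases hx : x = h
        · subst hx
          rw [if_pos rfl, if_pos (by simp)]
          conv_lhs => rw [pvRuns_head t x]
          simp [pvRuns]
        · rw [if_neg hx, if_neg (by simp [hx])]
          simp [pvRuns]
    | cons y ys =>
      have hLast : (x :: y :: ys).getLast? = (y :: ys).getLast? := by
        simp [List.getLast?_cons_cons]
      have hrec := ih b (by simp) hb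
      rw [List.cons_append] at hrec
      have h2 : (x :: y :: ys) ++ b = x :: y :: (ys ++ b) := by simp
      rw [h2, pvRuns_cons_cons, pvRuns_cons_cons x y ys, hLast]
      by_cases hxy : x = y
      · rw [if_pos hxy, if_pos hxy]
        exact hrec
      · rw [if_neg hxy, if_neg hxy, hrec]
        simp

lemma pvCollapse_eq_pvRuns : ∀ (fuel : Nat) (l : List Char), l.length ≤ fuel →
    pvCollapse fuel l = pvRuns l := by
  intro fuel
  induction fuel with
  | zero =>
    intro l hl
    match l, hl with
    | [], _ => rfl
  | succ fuel IH =>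
    intro l hl
    rw [pvCollapse]
    by_cases h : l.length ≤ 1
    · rw [if_pos h]
      match l, h with
      | [], _ => rfl
      | [x], _ => rfl
    · rw [if_neg h]
      show pvCollapse fuel (l.take (l.length / 2)) ++
          (if l[l.length / 2 - 1]? = l[l.length / 2]? then (pvCollapse fuel (l.drop (l.length / 2))).tail
           else pvCollapse fuel (l.drop (l.length / 2))) = pvRuns l
      have hlen : 2 ≤ l.length := by omega
      generalize hm : l.length / 2 = m
      have hm1 : 1 ≤ m := by omega
      have hmlt : m < l.length := by omega
      have hta : (l.take m).length = m := by simp; omega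
      have htd : (l.drop m).length = l.length - m := by simp
      have hA : pvCollapse fuel (l.take m) = pvRuns (l.take m) := IH _ (by omega)
      have hB : pvCollapse fuel (l.drop m) = pvRuns (l.drop m) := IH _ (by rw [htd]; omega)
      have hlast : (l.take m).getLast? = l[m-1]? := by
        rw [List.getLast?_eq_getElem?, hta, List.getElem?_take_of_lt (by omega)]
      have hhead : (l.drop m).head? = l[m]? := by
        rw [List.head?_eq_getElem?, List.getElem?_drop]
        simp
      have hsplit : l = l.take m ++ l.drop m := (List.take_append_drop m l).symm
      rw [hA, hB]
      conv_rhs => rw [hsplit]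
      rw [pvRuns_append (l.take m) (l.drop m)
        (by intro hc; rw [hc] at hta; simp at hta; omega)
        (by intro hc; rw [hc] at htd; simp at htd; omega)]
      rw [hlast, hhead]

-- ===== VERDICT =====
theorem get_topology_spec : Claim_equal_get_topology := by
  intro ss _
  unfold Spec_get_topology get_topology get_topology_alt
  rw [pvFoldl_eq_pvF, pvF_none, pvCollapse_eq_pvRuns _ _ le_rfl]
  by_cases h : ss.toList = []
  · rw [if_pos h, h]
    rfl
  · rw [if_neg h]
    simp
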